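-- pv_equiv track=rewrite | github.com/morristech/StringSheet | stringsheet/parser.py | parse_spreadsheet_values
-- ===== SOURCE A (Python) =====
-- def parse_spreadsheet_values(values):
--     """Parse the result returned by Google Spreadsheets API call.
--
--     Args:
--         values (dict): The json values data returned by Google Spreadsheets API.
--
--     Returns:
--         dict: A dictionary of strings mapped by language and then by string id.
--     """
--     title_row = values[0]
--
--     strings_by_language = {}
--
--     for lang_index in range(2, len(title_row)):
--         language = title_row[lang_index]
--
--         language_strings = {}
--         for row in values[1:]:
--             column_count = len(row)
--             if column_count < 3:
--                 # Actual strings shouldn't be separated by an empty row.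
--                 break
--
--             translation = row[lang_index] if column_count > lang_index else ''
--             string_id = row[0]
--             default_text = row[2]
--
--             if not string_id or not default_text:
--                 # All strings must have id and a default text.
--                 break
--
--             if ' ' in string_id:
--                 # String ids can't contain whitespace characters.
--                 # TODO: Check for more invalid characters
--                 break
--
--             language_strings[string_id] = translation
--
--         strings_by_language[language] = language_strings
--
--     return strings_by_language
-- ===== SOURCE B (Python) =====
-- def parse_spreadsheet_values(values):
--     title_row = values[0]
--     valid_rows = []
--     for row in values[1:]:
--         if len(row) < 3 or not row[0] or not row[2] or ' ' in row[0]: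
--             break
--         valid_rows.append(row)
--     return {
--         title_row[i]: {row[0]: (row[i] if len(row) > i else '')
--                        for row in valid_rows}
--         for i in range(2, len(title_row))
--     }
-- ===== Notes on version B (the rewrite author's own statement) =====
-- stated objective: alternative
-- what changed: B validates the data rows once into a leading prefix of valid rows, then builds each per-language dict by a pure projection over that prefix, replacing A's per-language re-validation of every row inside the language loop.
import Mathlib
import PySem

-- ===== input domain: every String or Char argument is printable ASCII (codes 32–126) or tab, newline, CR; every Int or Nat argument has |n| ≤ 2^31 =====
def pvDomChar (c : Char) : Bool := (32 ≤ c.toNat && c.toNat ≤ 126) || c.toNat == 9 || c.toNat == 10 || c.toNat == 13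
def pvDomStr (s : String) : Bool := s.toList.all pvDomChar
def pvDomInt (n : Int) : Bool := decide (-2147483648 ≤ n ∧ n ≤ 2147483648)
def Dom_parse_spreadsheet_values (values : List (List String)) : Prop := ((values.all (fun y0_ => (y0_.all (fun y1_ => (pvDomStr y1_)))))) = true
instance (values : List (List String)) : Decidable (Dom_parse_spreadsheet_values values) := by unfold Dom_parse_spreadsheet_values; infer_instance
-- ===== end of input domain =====

-- B validates the data rows once into a prefix list, then builds each per-language dict by a
-- simple projection over that list, instead of A's per-language re-validation loop (objective: alternative).


-- ===== PORT A =====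
-- inner loop over values[1:] for a fixed lang_index, with the three breaks
def parseInnerA (langIndex : Nat) (rows : List (List String)) (acc : PySem.Dict String String) :
    PySem.Dict String String :=
  match rows with
  | [] => acc
  | row :: rest =>
    if row.length < 3 then acc
    else
      let translation := if row.length > langIndex then row.getD langIndex "" else ""
      let string_id := row.getD 0 ""
      let default_text := row.getD 2 ""
      if string_id = "" ∨ default_text = "" then acc
      else if string_id.toList.contains ' ' then acc
      else parseInnerA langIndex rest (acc.insert string_id translation)

def parse_spreadsheet_values (values : List (List String)) : List (String × List (String × String)) :=
  let title_row := values.headD []      -- values[0]; Pre_ excludes the empty list where Python raises IndexError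
  let outer :=
    (PySem.List.pyRange 2 title_row.length 1).foldl
      (fun d i =>
        let language := title_row.getD i.toNat ""
        let language_strings := parseInnerA i.toNat (values.drop 1) PySem.Dict.empty
        d.insert language language_strings)
      PySem.Dict.empty
  outer.items.map (fun p => (p.1, p.2.items))

-- ===== PORT B =====
-- leading prefix of valid data rows (first failing row stops the collection)
def validPrefixB (rows : List (List String)) : List (List String) :=
  match rows with
  | [] => []
  | row :: rest =>
    if row.length < 3 ∨ row.getD 0 "" = "" ∨ row.getD 2 "" = "" ∨
        (row.getD 0 "").toList.contains ' ' then []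
    else row :: validPrefixB rest

def projLangB (langIndex : Nat) (rows : List (List String)) : PySem.Dict String String :=
  rows.foldl
    (fun d row =>
      d.insert (row.getD 0 "") (if row.length > langIndex then row.getD langIndex "" else ""))
    PySem.Dict.empty

def parse_spreadsheet_values_alt (values : List (List String)) : List (String × List (String × String)) :=
  let title_row := values.headD []
  let valid_rows := validPrefixB (values.drop 1)
  let outer :=
    (PySem.List.pyRange 2 title_row.length 1).foldl
      (fun d i => d.insert (title_row.getD i.toNat "") (projLangB i.toNat valid_rows))
      PySem.Dict.empty
  outer.items.map (fun p => (p.1, p.2.items))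

-- ===== PRECONDITION & SPEC =====
-- Pre_ excludes the empty values list, on which the Python A raises IndexError at values[0].
def Pre_parse_spreadsheet_values (values : List (List String)) : Prop := values ≠ []
instance (values : List (List String)) : Decidable (Pre_parse_spreadsheet_values values) := by
  unfold Pre_parse_spreadsheet_values; infer_instance

def pvWitness_parse_spreadsheet_values : List (List String) :=
  [["id", "comment", "en", "de"], ["hello", "c", "Hello", "Hallo"]]

def Spec_parse_spreadsheet_values (values : List (List String)) (out : List (String × List (String × String))) : Prop := out = parse_spreadsheet_values_alt values
instance (values : List (List String)) (out : List (String × List (String × String))) : Decidable (Spec_parse_spreadsheet_values values out) := by unfold Spec_parse_spreadsheet_values; infer_instance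

-- ===== CLAIM (what is proved, stated in full; the proofs are below) =====
def Claim_equal_parse_spreadsheet_values : Prop := ∀ (values : List (List String)), Dom_parse_spreadsheet_values values → Pre_parse_spreadsheet_values values → Spec_parse_spreadsheet_values values (parse_spreadsheet_values values)

-- ===== LEMMAS AND PROOFS =====

-- A's inner loop is B's projection fold over B's precomputed valid prefix
theorem parseInnerA_eq_fold (langIndex : Nat) (rows : List (List String))
    (acc : PySem.Dict String String) :
    parseInnerA langIndex rows acc =
      (validPrefixB rows).foldl
        (fun d row =>
          d.insert (row.getD 0 "") (if row.length > langIndex then row.getD langIndex "" else ""))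
        acc := by
  induction rows generalizing acc with
  | nil => rfl
  | cons row rest ih =>
    by_cases h1 : row.length < 3
    · simp [parseInnerA, validPrefixB, h1]
    · by_cases h2 : row[0]?.getD "" = ""
      · simp [parseInnerA, validPrefixB, h1, h2]
      · by_cases h3 : row[2]?.getD "" = ""
        · simp [parseInnerA, validPrefixB, h1, h2, h3]
        · by_cases h4 : ' ' ∈ (row[0]?.getD "").toList
          · simp [parseInnerA, validPrefixB, h1, h2, h3, h4]
          · simp [parseInnerA, validPrefixB, h1, h2, h3, h4, ih]

theorem parse_spreadsheet_values_eq (values : List (List String)) :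
    parse_spreadsheet_values values = parse_spreadsheet_values_alt values := by
  simp only [parse_spreadsheet_values, parse_spreadsheet_values_alt, projLangB,
    parseInnerA_eq_fold]

-- ===== VERDICT (by name: the statement is the Claim_ definition above) =====
theorem parse_spreadsheet_values_spec : Claim_equal_parse_spreadsheet_values := by
  intro values _ _
  exact parse_spreadsheet_values_eq values
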